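-- pv_equiv track=rewrite | github.com/vindennl48/MidiStompV2 | python/GetArgs.py | filterArgs
-- ===== SOURCE A (Python) =====
-- def filterArgs(arguments):
--     sysargs = arguments
--
--     args = []
--     temp = []
--     for i in range(len(sysargs)):
--         if sysargs[i][:1] == '-':
--             temp = []
--             temp.append(sysargs[i])
--             for j in range(len(sysargs)):
--                 if j == 0:
--                     continue
--                 k = j + i
--                 if k < len(sysargs) and sysargs[k][:1] != '-':
--                     temp.append(sysargs[k])
--                 else:
--                     break
--             args.append(temp)
--     return args
-- ===== SOURCE B (Python) =====
-- def filterArgs(arguments):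
--     args = []
--     for a in arguments:
--         if a.startswith('-'):
--             args.append([a])
--         elif args:
--             args[-1].append(a)
--     return args
-- ===== Notes on version B (the rewrite author's own statement) =====
-- stated objective: simpler
-- what changed: Replaces the outer index loop with a per-flag inner rescan (j over the whole range with i+j indexing and an explicit break) by one left-to-right pass that starts a new group at each dash argument and appends each following non-dash argument to the last open group.
import Mathlib
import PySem

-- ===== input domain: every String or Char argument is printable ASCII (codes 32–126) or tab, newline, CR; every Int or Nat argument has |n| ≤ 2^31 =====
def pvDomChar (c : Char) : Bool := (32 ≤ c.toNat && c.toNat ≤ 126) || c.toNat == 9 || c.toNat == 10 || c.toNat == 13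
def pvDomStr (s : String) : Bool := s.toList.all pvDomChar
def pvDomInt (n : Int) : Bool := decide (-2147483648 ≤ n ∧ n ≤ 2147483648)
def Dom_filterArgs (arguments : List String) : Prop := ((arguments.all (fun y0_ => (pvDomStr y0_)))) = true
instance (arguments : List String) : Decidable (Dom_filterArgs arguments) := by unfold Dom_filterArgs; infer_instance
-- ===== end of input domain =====

-- B replaces A's per-flag inner rescan (j over range(len) with i+j indexing and a break) by one
-- left-to-right pass appending each non-dash argument to the last open group (objective: simpler).

-- ===== PORT A =====
-- inner 'for j in range(len(sysargs))' loop of A, with its 'continue' (j == 0) and 'break'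
def filterArgsInner (sa : List String) (i : Nat) : List Nat → List String → List String
  | [], temp => temp
  | j :: js, temp =>
    if j = 0 then filterArgsInner sa i js temp
    else
      if j + i < sa.length ∧ ¬ (PySem.Str.slice (sa.getD (j + i) "") none (some 1) = "-") then
        filterArgsInner sa i js (temp ++ [sa.getD (j + i) ""])
      else temp

-- outer 'for i in range(len(sysargs))' loop of A
def filterArgsOuter (sa : List String) : List Nat → List (List String) → List (List String)
  | [], args => args
  | i :: is, args =>
    if PySem.Str.slice (sa.getD i "") none (some 1) = "-" then
      filterArgsOuter sa is
        (args ++ [filterArgsInner sa i (List.range sa.length) [sa.getD i ""]])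
    else filterArgsOuter sa is args

def filterArgs (arguments : List String) : List (List String) :=
  filterArgsOuter arguments (List.range arguments.length) []

-- ===== PORT B =====
def filterArgs_alt (arguments : List String) : List (List String) :=
  arguments.foldl
    (fun args a =>
      if PySem.Str.startswith a "-" then args ++ [[a]]
      else if args = [] then args
      else args.dropLast ++ [((args.getLast?).getD []) ++ [a]])
    []

-- ===== PRECONDITION & SPEC =====
def Spec_filterArgs (arguments : List String) (out : List (List String)) : Prop := out = filterArgs_alt arguments
instance (arguments : List String) (out : List (List String)) : Decidable (Spec_filterArgs arguments out) := by unfold Spec_filterArgs; infer_instance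

-- ===== CLAIM (what is proved, stated in full; the proofs are below) =====
def Claim_equal_filterArgs : Prop := ∀ (arguments : List String), Dom_filterArgs arguments → Spec_filterArgs arguments (filterArgs arguments)

-- ===== LEMMAS AND PROOFS =====

-- the grouping both programs compute
def pvDash (s : String) : Bool := PySem.Str.startswith s "-"

def pvGroups : List String → List (List String)
  | [] => []
  | a :: rest =>
    if pvDash a then (a :: rest.takeWhile (fun x => !pvDash x)) :: pvGroups rest
    else pvGroups rest

-- A's test  s[:1] == '-'  agrees with B's  s.startswith('-')
lemma pvDash_iff (s : String) :
    (PySem.Str.slice s none (some 1) = "-") ↔ pvDash s = true := by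
  rw [String.ext_iff]
  simp [pvDash, PySem.Chars.startswith_iff]
  rw [show ((1:Int) = ((1:Nat):Int)) by norm_num, PySem.List.slice_to_natCast]
  cases s.toList with
  | nil => simp
  | cons c rest => simp [List.cons_prefix_cons, eq_comm]

-- A's inner loop collects the consecutive non-dash arguments after position i
lemma pvInner_range' (sa : List String) (i : Nat) :
    ∀ (c j : Nat) (temp : List String), 1 ≤ j → sa.length ≤ c + j + i →
      filterArgsInner sa i (List.range' j c) temp
        = temp ++ (sa.drop (j + i)).takeWhile (fun x => !pvDash x) := by
  intro c
  induction c with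
  | zero =>
    intro j temp hj hlen
    rw [List.drop_of_length_le (by omega)]
    simp [filterArgsInner]
  | succ c ih =>
    intro j temp hj hlen
    rw [List.range'_succ]
    rw [filterArgsInner]
    rw [if_neg (by omega)]
    by_cases hk : j + i < sa.length
    · rw [List.drop_eq_getElem_cons hk, List.getD_eq_getElem sa "" hk]
      by_cases hd : pvDash sa[j + i] = true
      · rw [if_neg (by rw [pvDash_iff]; tauto)]
        simp [hd]
      · rw [if_pos ⟨hk, by rw [pvDash_iff]; simp [hd]⟩]
        rw [ih (j+1) (temp ++ [sa[j+i]]) (by omega) (by omega)]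
        have : j + 1 + i = j + i + 1 := by omega
        rw [this, List.takeWhile_cons]
        simp [hd]
    · rw [if_neg (by tauto)]
      rw [List.drop_of_length_le (by omega)]
      simp

lemma pvInner_full (sa : List String) (i : Nat) (hi : i < sa.length) (temp : List String) :
    filterArgsInner sa i (List.range sa.length) temp
      = temp ++ (sa.drop (i + 1)).takeWhile (fun x => !pvDash x) := by
  rw [List.range_eq_range']
  obtain ⟨n, hn⟩ : ∃ n, sa.length = n + 1 := ⟨sa.length - 1, by omega⟩
  rw [hn, List.range'_succ, filterArgsInner, if_pos rfl,
      pvInner_range' sa i n 1 temp (by omega) (by omega)]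
  have : 1 + i = i + 1 := by omega
  rw [this]

lemma pvOuter_range' (sa : List String) :
    ∀ (c i : Nat) (args : List (List String)), i + c = sa.length →
      filterArgsOuter sa (List.range' i c) args = args ++ pvGroups (sa.drop i) := by
  intro c
  induction c with
  | zero =>
    intro i args h
    rw [List.drop_of_length_le (by omega)]
    simp [filterArgsOuter, pvGroups]
  | succ c ih =>
    intro i args h
    have hi : i < sa.length := by omega
    rw [List.range'_succ, filterArgsOuter, List.getD_eq_getElem sa "" hi,
        List.drop_eq_getElem_cons hi, pvGroups]
    by_cases hd : pvDash sa[i] = true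
    · rw [if_pos ((pvDash_iff _).mpr hd), pvInner_full sa i hi,
          ih (i+1) _ (by omega), if_pos hd]
      simp
    · rw [if_neg (by rw [pvDash_iff]; exact hd), ih (i+1) _ (by omega), if_neg hd]

lemma pvA_eq_groups (sa : List String) : filterArgs sa = pvGroups sa := by
  rw [filterArgs, List.range_eq_range', pvOuter_range' sa sa.length 0 [] (by omega)]
  simp

-- B's fold with a non-empty accumulator: the last group stays open
lemma pvB_step (l : List String) :
    ∀ (args : List (List String)) (g : List String),
      List.foldl
        (fun args a =>
          if PySem.Str.startswith a "-" then args ++ [[a]]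
          else if args = [] then args
          else args.dropLast ++ [((args.getLast?).getD []) ++ [a]])
        (args ++ [g]) l
      = args ++ (g ++ l.takeWhile (fun x => !pvDash x)) :: pvGroups l := by
  induction l with
  | nil => intro args g; simp [pvGroups]
  | cons a rest ih =>
    intro args g
    rw [List.foldl_cons]
    by_cases hd : pvDash a = true
    · have : (PySem.Str.startswith a "-") = true := hd
      rw [if_pos this]
      rw [show args ++ [g] ++ [[a]] = (args ++ [g]) ++ [[a]] by simp, ih]
      simp [pvGroups, hd]
    · have hs : ¬ (PySem.Str.startswith a "-") = true := hd
      rw [if_neg hs, if_neg (by simp), List.dropLast_concat, List.getLast?_concat]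
      rw [show (some g).getD [] = g from rfl, ih]
      simp [pvGroups, hd]

lemma pvB_eq_groups (sa : List String) : filterArgs_alt sa = pvGroups sa := by
  rw [filterArgs_alt]
  induction sa with
  | nil => simp [pvGroups]
  | cons a rest ih =>
    rw [List.foldl_cons]
    by_cases hd : pvDash a = true
    · rw [if_pos (show (PySem.Str.startswith a "-") = true from hd), pvB_step]
      simp [pvGroups, hd]
    · rw [if_neg (show ¬ (PySem.Str.startswith a "-") = true from hd), if_pos rfl, ih]
      simp [pvGroups, hd]

-- ===== VERDICT (by name: the statement is the Claim_ definition above) =====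
theorem filterArgs_spec : Claim_equal_filterArgs := by
  intro arguments _
  unfold Spec_filterArgs
  rw [pvA_eq_groups, pvB_eq_groups]
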